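-- pv_equiv track=rewrite | github.com/junix/ner | entity_detect/ner.py | select_keywords
-- ===== SOURCE A (Python) =====
-- def select_keywords(words, tags):
--     keywords, prev_tag = [], 0
--     for word, tag in zip(words, tags):
--         if tag == 1:
--             if prev_tag != 1 and keywords:
--                 keywords.append(' ')
--             keywords.append(word)
--         prev_tag = tag
--     return ''.join(keywords)
-- ===== SOURCE B (Python) =====
-- def select_keywords(words, tags):
--     # Two-level structure: split the tagged sequence into maximal runs of
--     # tag == 1, join each run with no separator, then join runs with spaces.
--     pairs = list(zip(words, tags))
--     n = len(pairs)
--     segments = []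
--     k = 0
--     while k < n:
--         if pairs[k][1] == 1:
--             parts = []
--             while k < n and pairs[k][1] == 1:
--                 parts.append(pairs[k][0])
--                 k += 1
--             segments.append(''.join(parts))
--         else:
--             k += 1
--     return ' '.join(segments)
-- ===== Notes on version B (the rewrite author's own statement) =====
-- stated objective: idiomatic
-- what changed: Replaces A's single pass with a prev_tag flag and in-band space insertion by a group-then-join structure: split into maximal runs of tag==1, concatenate each run, then ' '.join the run segments.
import Mathlib
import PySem

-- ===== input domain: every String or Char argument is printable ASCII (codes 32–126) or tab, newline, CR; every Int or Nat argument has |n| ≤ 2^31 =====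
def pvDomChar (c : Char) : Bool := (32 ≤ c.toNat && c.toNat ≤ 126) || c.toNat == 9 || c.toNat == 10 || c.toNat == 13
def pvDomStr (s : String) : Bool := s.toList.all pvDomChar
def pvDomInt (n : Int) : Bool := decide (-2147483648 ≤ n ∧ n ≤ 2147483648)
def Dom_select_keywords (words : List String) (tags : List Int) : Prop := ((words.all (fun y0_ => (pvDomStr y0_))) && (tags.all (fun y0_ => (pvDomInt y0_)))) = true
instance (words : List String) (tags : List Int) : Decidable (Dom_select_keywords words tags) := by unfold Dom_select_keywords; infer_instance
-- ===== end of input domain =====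

-- B is an idiomatic group-then-join re-decomposition of A (same return value; no side effects involved).

-- ===== PORT A =====
-- loop body of A: appends a separating ' ' when a new tag==1 run starts and keywords is nonempty
def pvStepA (st : List String × Int) (wt : String × Int) : List String × Int :=
  if wt.2 = 1 then
    (if st.2 ≠ 1 ∧ st.1 ≠ [] then st.1 ++ [" "] ++ [wt.1] else st.1 ++ [wt.1], wt.2)
  else (st.1, wt.2)

def select_keywords (words : List String) (tags : List Int) : String :=
  PySem.Str.join "" ((words.zip tags).foldl pvStepA (([] : List String), (0 : Int))).1

-- ===== PORT B =====
-- inner while loop of B: the words of the maximal leading run of tag==1, and the remainder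
def pvTakeRun : List (String × Int) → List String × List (String × Int)
  | [] => ([], [])
  | (w, t) :: rest =>
    if t = 1 then
      ((w :: (pvTakeRun rest).1), (pvTakeRun rest).2)
    else ([], (w, t) :: rest)

theorem pvTakeRun_len (l : List (String × Int)) : (pvTakeRun l).2.length ≤ l.length := by
  induction l with
  | nil => simp [pvTakeRun]
  | cons p rest ih =>
    obtain ⟨w, t⟩ := p
    by_cases h : t = 1 <;> simp [pvTakeRun, h]
    omega

-- outer while loop of B: the list 'segments' (each maximal tag==1 run joined with '')
def pvSegments : List (String × Int) → List String
  | [] => []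
  | (w, t) :: rest =>
    if t = 1 then
      PySem.Str.join "" (w :: (pvTakeRun rest).1) :: pvSegments (pvTakeRun rest).2
    else pvSegments rest
  termination_by l => l.length
  decreasing_by
  · have := pvTakeRun_len rest; simp; omega
  · simp

def select_keywords_alt (words : List String) (tags : List Int) : String :=
  PySem.Str.join " " (pvSegments (words.zip tags))

-- ===== PRECONDITION & SPEC =====
def Spec_select_keywords (words : List String) (tags : List Int) (out : String) : Prop := out = select_keywords_alt words tags
instance (words : List String) (tags : List Int) (out : String) : Decidable (Spec_select_keywords words tags out) := by unfold Spec_select_keywords; infer_instance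

-- ===== CLAIM (what is proved, stated in full; the proofs are below) =====
def Claim_equal_select_keywords : Prop := ∀ (words : List String) (tags : List Int), Dom_select_keywords words tags → Spec_select_keywords words tags (select_keywords words tags)

-- ===== LEMMAS AND PROOFS =====

theorem jE_nil : PySem.Str.join "" [] = "" := rfl

theorem jS_nil : PySem.Str.join " " [] = "" := rfl

theorem jE_cons (w : String) (xs : List String) :
    PySem.Str.join "" (w :: xs) = w ++ PySem.Str.join "" xs := by
  rw [← String.toList_inj]
  cases xs with
  | nil =>
    simp [PySem.Str.toList_join, PySem.Chars.join_singleton, PySem.Chars.join_nil]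
  | cons y ys =>
    simp [PySem.Str.toList_join, PySem.Chars.join_cons_cons, String.toList_append]

theorem jE_append (xs ys : List String) :
    PySem.Str.join "" (xs ++ ys) = PySem.Str.join "" xs ++ PySem.Str.join "" ys := by
  induction xs with
  | nil => simp [jE_nil]
  | cons w xs ih => simp [jE_cons, ih, String.append_assoc]

theorem jS_cons (s : String) (xs : List String) :
    PySem.Str.join " " (s :: xs) =
      s ++ (if xs = [] then "" else " " ++ PySem.Str.join " " xs) := by
  cases xs with
  | nil =>
    rw [← String.toList_inj]
    simp [PySem.Str.toList_join, PySem.Chars.join_singleton]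
  | cons y ys =>
    rw [← String.toList_inj]
    simp [PySem.Str.toList_join, PySem.Chars.join_cons_cons, String.toList_append,
      List.append_assoc]

-- glue text that A's loop will still produce from state (kw, prev) when prev ≠ 1:
def pvGlue (l : List (String × Int)) (ne : Bool) : String :=
  if pvSegments l = [] then "" else (if ne then " " else "") ++ PySem.Str.join " " (pvSegments l)

theorem pvMain : ∀ (l : List (String × Int)) (kw : List String) (prev : Int),
    (prev = 1 → kw ≠ []) →
    PySem.Str.join "" ((l.foldl pvStepA (kw, prev)).1) =
      (if prev = 1 then
        PySem.Str.join "" kw ++ PySem.Str.join "" (pvTakeRun l).1 ++ pvGlue (pvTakeRun l).2 true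
      else
        PySem.Str.join "" kw ++ pvGlue l (decide (kw ≠ []))) := by
  intro l
  induction l with
  | nil =>
    intro kw prev _
    by_cases hp : prev = 1 <;>
      simp [hp, pvTakeRun, pvGlue, pvSegments, jE_nil, String.append_empty]
  | cons p rest ih =>
    intro kw prev hkw
    obtain ⟨w, t⟩ := p
    by_cases ht : t = 1
    · subst ht
      by_cases hp : prev = 1
      · -- continuing a run: no separator
        have hstep : pvStepA (kw, prev) (w, 1) = (kw ++ [w], 1) := by
          simp [pvStepA, hp]
        rw [List.foldl_cons, hstep, ih (kw ++ [w]) 1 (fun _ => by simp)]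
        simp [hp, pvTakeRun, jE_append, jE_cons, jE_nil, String.append_assoc,
          String.append_empty]
      · -- starting a new run: separator iff kw ≠ []
        have hseg : pvSegments ((w, 1) :: rest) =
            PySem.Str.join "" (w :: (pvTakeRun rest).1) :: pvSegments (pvTakeRun rest).2 := by
          rw [pvSegments]; simp
        by_cases hk : kw = []
        · have hstep : pvStepA (kw, prev) (w, 1) = (kw ++ [w], 1) := by
            simp [pvStepA, hk]
          rw [List.foldl_cons, hstep, ih (kw ++ [w]) 1 (fun _ => by simp)]
          simp only [hp, if_true, if_false]
          rw [hk]
          simp only [pvGlue, hseg]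
          simp [jS_cons, jE_cons, jE_nil, String.append_assoc, String.append_empty,
            String.empty_append]
        · have hstep : pvStepA (kw, prev) (w, 1) = (kw ++ [" "] ++ [w], 1) := by
            simp [pvStepA, hp, hk]
          rw [List.foldl_cons, hstep, ih (kw ++ [" "] ++ [w]) 1 (fun _ => by simp)]
          simp only [hp, if_true, if_false]
          simp only [pvGlue, hseg]
          simp [hk, jS_cons, jE_append, jE_cons, jE_nil, String.append_assoc,
            String.append_empty]
    · -- tag ≠ 1: word dropped, prev_tag updated
      have hstep : pvStepA (kw, prev) (w, t) = (kw, t) := by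
        simp [pvStepA, ht]
      have hseg : pvSegments ((w, t) :: rest) = pvSegments rest := by
        rw [pvSegments]; simp [ht]
      rw [List.foldl_cons, hstep, ih kw t (fun h => absurd h ht)]
      by_cases hp : prev = 1
      · have hne : kw ≠ [] := hkw hp
        simp [ht, hp, pvTakeRun, pvGlue, hseg, jE_nil, hne]
      · simp [ht, hp, pvGlue, hseg]

-- ===== VERDICT (by name: the statement is the Claim_ definition above) =====
theorem select_keywords_spec : Claim_equal_select_keywords := by
  intro words tags _
  unfold Spec_select_keywords select_keywords select_keywords_alt
  rw [pvMain (words.zip tags) [] 0 (by simp)]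
  by_cases h : pvSegments (words.zip tags) = [] <;>
    simp [pvGlue, h, jE_nil, jS_nil, String.empty_append]
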